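-- pv_equiv track=rewrite | github.com/pypi-data/pypi-mirror-401 | packages/metanetmap/metanetmap-1.1.2.tar.gz/metanetmap-1.1.2/src/metanetmap/utils.py | find_all_entries_with_value_tsv
-- ===== SOURCE A (Python) =====
-- def find_all_entries_with_value_tsv(data, target_value):
--     """
--     Search through a list of dictionaries and return a list of all
--     dictionaries where any key or value matches the target_value
--     (case-insensitive). Values can be strings or lists/tuples of
--     strings. If a string contains ' _AND_ ', split it and check each
--     part.
--
--     Args:
--         data (list): List of dictionaries to search.
--         target_value (str): The value to look for (case-insensitive).
--
--     Returns:
--         list: List of dictionaries containing the target_value in any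
--         key or value. Empty list if none found.
--     """
--     target_value_lower = target_value.lower()
--     matched_entries = []
--
--     def check_string(s):
--         # Split on ' _AND_' and check each part
--         parts = [part.strip() for part in s.split(" _AND_ ")]
--         return any(part.lower() == target_value_lower for part in parts)
--
--     for entry in data:
--         # Check keys
--         if any(check_string(str(k)) for k in entry.keys()):
--             matched_entries.append(entry)
--             continue  # Already matched, skip values
--
--         # Check values
--         for val in entry.values():
--             if isinstance(val, str):
--                 if check_string(val):
--                     matched_entries.append(entry)
--                     break
--             elif isinstance(val, (list, tuple)):
--                 # Check each item, which should be a string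
--                 if any(isinstance(item, str) and check_string(item) for item in val):
--                     matched_entries.append(entry)
--                     break
--
--     return matched_entries
-- ===== SOURCE B (Python) =====
-- def find_all_entries_with_value_tsv(data, target_value):
--     """Inverted-index rewrite: one pass builds token -> entry indices, then a
--     single lookup of the normalized target returns the matching entries."""
--     index = {}
--     for i, entry in enumerate(data):
--         tokens = []
--         for k in entry.keys():
--             tokens.append(str(k))
--         for v in entry.values():
--             if isinstance(v, str):
--                 tokens.append(v)
--             elif isinstance(v, (list, tuple)):
--                 tokens.extend(x for x in v if isinstance(x, str))
--         keys = dict.fromkeys(p.strip().lower()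
--                              for t in tokens for p in t.split(" _AND_ "))
--         for key in keys:
--             index.setdefault(key, []).append(i)
--     return [data[i] for i in index.get(target_value.lower(), [])]
-- ===== Notes on version B (the rewrite author's own statement) =====
-- stated objective: alternative
-- what changed: Replaces A's per-entry keys-then-values matching loop (continue/break, short-circuiting check_string) by an inverted index: one pass builds a dict mapping every normalized token part to the list of entry indices containing it, and the answer is a single lookup of the lowered target followed by materializing those entries.
import Mathlib
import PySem

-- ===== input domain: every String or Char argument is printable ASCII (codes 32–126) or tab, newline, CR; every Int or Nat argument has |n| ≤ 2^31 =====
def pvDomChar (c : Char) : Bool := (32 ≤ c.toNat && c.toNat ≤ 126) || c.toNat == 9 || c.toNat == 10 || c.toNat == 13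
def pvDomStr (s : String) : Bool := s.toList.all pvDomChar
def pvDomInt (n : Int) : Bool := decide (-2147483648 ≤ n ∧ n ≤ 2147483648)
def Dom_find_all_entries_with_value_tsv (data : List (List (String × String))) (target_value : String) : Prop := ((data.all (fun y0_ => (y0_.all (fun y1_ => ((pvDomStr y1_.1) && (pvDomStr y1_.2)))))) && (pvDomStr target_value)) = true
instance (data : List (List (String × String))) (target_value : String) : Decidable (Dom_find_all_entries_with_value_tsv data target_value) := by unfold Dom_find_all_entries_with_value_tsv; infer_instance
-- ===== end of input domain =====

-- B replaces A's per-entry keys-then-values matching loop by an inverted index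
-- (normalized token -> entry indices) queried once with the lowered target; objective: alternative.

-- ===== PORT A =====
-- check_string(s): split on " _AND_ ", strip each part, compare lowered parts to the lowered target
def pvCheckString (tl : List Char) (s : String) : Bool :=
  ((PySem.Chars.splitOn s.toList " _AND_ ".toList).map PySem.Chars.strip).any
    (fun part => PySem.Chars.lower part == tl)

-- the inner 'for val in entry.values(): … break' loop: true = a value matched (append and break)
def pvValsLoop (tl : List Char) : List String → Bool
  | [] => false
  | v :: rest => if pvCheckString tl v then true else pvValsLoop tl rest

def find_all_entries_with_value_tsv (data : List (List (String × String))) (target_value : String) : List (List (String × String)) :=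
  let target_value_lower := PySem.Chars.lower target_value.toList
  data.foldl (fun matched_entries entry =>
    if (entry.map Prod.fst).any (pvCheckString target_value_lower) then
      matched_entries ++ [entry]   -- matched on keys; continue
    else if pvValsLoop target_value_lower (entry.map Prod.snd) then
      matched_entries ++ [entry]   -- matched on a value; break
    else matched_entries) []

-- ===== PORT B =====
-- dict.fromkeys dedup of the normalized parts of one entry's tokens (keys then values;
-- at this type every value is a string)
def pvEntryKeys (entry : List (String × String)) : List (List Char) :=
  PySem.List.dedup
    (((entry.map Prod.fst ++ entry.map Prod.snd).flatMap
        (fun t => PySem.Chars.splitOn t.toList " _AND_ ".toList)).map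
      (fun p => PySem.Chars.lower (PySem.Chars.strip p)))

-- index.setdefault(key, []).append(i) over the deduped keys of one entry
def pvIndexEntry (i : Int) (entry : List (String × String))
    (idx : PySem.Dict (List Char) (List Int)) : PySem.Dict (List Char) (List Int) :=
  (pvEntryKeys entry).foldl (fun idx key => idx.insert key (idx.getD key [] ++ [i])) idx

def find_all_entries_with_value_tsv_alt (data : List (List (String × String))) (target_value : String) : List (List (String × String)) :=
  let index := (PySem.List.enumerate data).foldl
    (fun idx p => pvIndexEntry p.1 p.2 idx) PySem.Dict.empty
  (index.getD (PySem.Chars.lower target_value.toList) []).map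
    (fun i => PySem.List.pyGetD data i [])   -- data[i]; every stored index is in range

-- ===== PRECONDITION & SPEC =====
def Spec_find_all_entries_with_value_tsv (data : List (List (String × String))) (target_value : String) (out : List (List (String × String))) : Prop := out = find_all_entries_with_value_tsv_alt data target_value
instance (data : List (List (String × String))) (target_value : String) (out : List (List (String × String))) : Decidable (Spec_find_all_entries_with_value_tsv data target_value out) := by unfold Spec_find_all_entries_with_value_tsv; infer_instance

-- ===== CLAIM (what is proved, stated in full; the proofs are below) =====
def Claim_equal_find_all_entries_with_value_tsv : Prop := ∀ (data : List (List (String × String))) (target_value : String), Dom_find_all_entries_with_value_tsv data target_value → Spec_find_all_entries_with_value_tsv data target_value (find_all_entries_with_value_tsv data target_value)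

-- ===== LEMMAS AND PROOFS =====

-- the break-loop over values is the same test as 'any'
theorem pvValsLoop_eq_any (tl : List Char) (vs : List String) :
    pvValsLoop tl vs = vs.any (pvCheckString tl) := by
  induction vs with
  | nil => rfl
  | cons v rest ih => by_cases h : pvCheckString tl v <;> simp [pvValsLoop, ih, h]

-- A's per-entry test = membership of the target in the entry's normalized key set
theorem pvEntry_match (tl : List Char) (entry : List (String × String)) :
    ((entry.map Prod.fst).any (pvCheckString tl)
      || pvValsLoop tl (entry.map Prod.snd))
    = decide (tl ∈ pvEntryKeys entry) := by
  rw [pvValsLoop_eq_any, ← List.any_append]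
  refine Bool.eq_iff_iff.mpr ?_
  simp only [pvEntryKeys, List.any_eq_true, decide_eq_true_eq,
    PySem.List.mem_dedup, List.mem_map, List.mem_flatMap, pvCheckString,
    beq_iff_eq]
  constructor
  · rintro ⟨x, hx, x1, ⟨a, ha, rfl⟩, hEq⟩
    exact ⟨a, ⟨x, hx, ha⟩, hEq⟩
  · rintro ⟨a, ⟨x, hx, ha⟩, hEq⟩
    exact ⟨x, hx, PySem.Chars.strip a, ⟨a, ha, rfl⟩, hEq⟩

-- the deduped key list of an entry has no duplicates
theorem pvEntryKeys_nodup (entry : List (String × String)) : (pvEntryKeys entry).Nodup := by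
  unfold pvEntryKeys; exact PySem.List.nodup_dedup _

-- one entry's indexing step changes each key's posting list by at most one append
theorem pvGetD_foldl_insert (i : Int) (ks : List (List Char)) (hnd : ks.Nodup)
    (idx : PySem.Dict (List Char) (List Int)) (k : List Char) :
    (ks.foldl (fun idx key => idx.insert key (idx.getD key [] ++ [i])) idx).getD k []
      = idx.getD k [] ++ (if k ∈ ks then [i] else []) := by
  induction ks generalizing idx with
  | nil => simp
  | cons key rest ih =>
    simp only [List.nodup_cons] at hnd
    simp only [List.foldl_cons, ih hnd.2, List.mem_cons]
    by_cases hk : k = key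
    · subst hk
      rw [PySem.Dict.getD_insert_self]
      simp [hnd.1]
    · rw [PySem.Dict.getD_insert_of_ne _ _ _ hk]
      simp [hk]

-- the index built over any (index, entry) pairs: posting list of k = indices of matching entries
theorem pvGetD_build (k : List Char) (pairs : List (Int × List (String × String)))
    (idx : PySem.Dict (List Char) (List Int)) :
    (pairs.foldl (fun idx p => pvIndexEntry p.1 p.2 idx) idx).getD k []
      = idx.getD k []
        ++ (pairs.filter (fun p => decide (k ∈ pvEntryKeys p.2))).map Prod.fst := by
  induction pairs generalizing idx with
  | nil => simp
  | cons p rest ih =>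
    simp only [List.foldl_cons, ih, List.filter_cons]
    unfold pvIndexEntry
    rw [pvGetD_foldl_insert p.1 (pvEntryKeys p.2) (pvEntryKeys_nodup p.2) idx k]
    by_cases h : k ∈ pvEntryKeys p.2 <;> simp [h]

-- A's accumulator fold is 'acc ++ filter by membership'
theorem pvFoldl_eq_filter (tl : List Char) (data : List (List (String × String)))
    (acc : List (List (String × String))) :
    data.foldl (fun matched_entries entry =>
      if (entry.map Prod.fst).any (pvCheckString tl) then matched_entries ++ [entry]
      else if pvValsLoop tl (entry.map Prod.snd) then matched_entries ++ [entry]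
      else matched_entries) acc
    = acc ++ data.filter (fun entry => decide (tl ∈ pvEntryKeys entry)) := by
  induction data generalizing acc with
  | nil => simp
  | cons e rest ih =>
    have hm := pvEntry_match tl e
    simp only [List.foldl_cons, List.filter_cons]
    by_cases h1 : (e.map Prod.fst).any (pvCheckString tl)
    · simp only [h1, Bool.true_or] at hm
      simp [h1, ih, ← hm]
    · by_cases h2 : pvValsLoop tl (e.map Prod.snd)
      · simp only [h1, h2, Bool.false_or] at hm
        simp [h1, h2, ih, ← hm]
      · simp only [h1, h2, Bool.false_or] at hm
        simp [h1, h2, ih, ← hm]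

-- every pair of enumerate(data, s) is (s + j, data[j])
theorem pvMem_enumerate {α : Type} (data : List α) (s : Int) (p : Int × α)
    (hp : p ∈ PySem.List.enumerate data s) :
    ∃ j : Nat, p.1 = s + (j : Int) ∧ data[j]? = some p.2 := by
  induction data generalizing s with
  | nil => simp [PySem.List.enumerate] at hp
  | cons x xs ih =>
    rw [PySem.List.enumerate_cons, List.mem_cons] at hp
    rcases hp with rfl | hp
    · exact ⟨0, by simp⟩
    · obtain ⟨j, hj, hget⟩ := ih (s + 1) hp
      exact ⟨j + 1, by push_cast at hj ⊢; omega, by simpa using hget⟩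

-- materializing the looked-up indices recovers the filtered entries
theorem pvMap_enumerate_filter (P : List (String × String) → Bool)
    (data : List (List (String × String))) :
    (((PySem.List.enumerate data).filter (fun p => P p.2)).map
        (fun p => PySem.List.pyGetD data p.1 []))
      = data.filter P := by
  have hmem : ∀ p ∈ (PySem.List.enumerate data).filter (fun p => P p.2),
      PySem.List.pyGetD data p.1 [] = p.2 := by
    intro p hp
    obtain ⟨j, hj, hget⟩ := pvMem_enumerate data 0 p (List.mem_of_mem_filter hp)
    rw [hj]
    simp only [zero_add, PySem.List.pyGetD_natCast, List.getD]
    simp [hget]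
  calc ((PySem.List.enumerate data).filter (fun p => P p.2)).map
          (fun p => PySem.List.pyGetD data p.1 [])
      = ((PySem.List.enumerate data).filter (fun p => P p.2)).map (fun p => p.2) :=
        List.map_congr_left hmem
    _ = data.filter P := by
        conv_rhs => rw [← PySem.List.map_snd_enumerate data 0, List.filter_map]
        rfl

-- ===== VERDICT (by name: the statement is the Claim_ definition above) =====
theorem find_all_entries_with_value_tsv_spec : Claim_equal_find_all_entries_with_value_tsv := by
  intro data target_value _
  unfold Spec_find_all_entries_with_value_tsv
  simp only [find_all_entries_with_value_tsv, find_all_entries_with_value_tsv_alt]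
  rw [pvGetD_build, pvFoldl_eq_filter]
  simp only [PySem.Dict.getD_empty, List.nil_append, List.map_map]
  exact (pvMap_enumerate_filter _ data).symm
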